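-- pv_equiv track=rewrite | github.com/b-schneller/Neural-Machine-Translation-English-to-Spanish | neural_machine_translation/data_preprocessing.py | create_bucket_dict
-- ===== SOURCE A (Python) =====
-- import math
--
-- def create_bucket_dict(eng_sentences, span_sentences):
--     sample_bucket_sizes = []
--     bucket_dict = {}
--     for eng_sentence, span_sentence in zip(eng_sentences, span_sentences):
--         max_len = max(len(eng_sentence.split()), len(span_sentence.split()))
--         rounded_max_len = roundup(max_len)
--         sample_bucket_sizes.append(rounded_max_len)
--     for i in range(10, max(sample_bucket_sizes) + 1, 10):
--         bucket_dict[i] = create_buckets(sample_bucket_sizes, i)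
--
--     return bucket_dict
--
-- def roundup(x):
--     return int(math.ceil((x + 1) / 10.0)) * 10  # x+1 to push *0 into next bucket to account for tokens
--
-- def create_buckets(buckets, bucket_len):
--     return [index for index, value in enumerate(buckets) if value == bucket_len]
-- ===== SOURCE B (Python) =====
-- def create_bucket_dict(eng_sentences, span_sentences):
--     # Alternative: one grouping pass into a dict keyed by bucket, then emit every multiple
--     # of 10 up to the largest bucket (empty list where no sample fell).
--     groups = {}
--     max_b = 0
--     for idx, (eng_sentence, span_sentence) in enumerate(zip(eng_sentences, span_sentences)):
--         b = (max(len(eng_sentence.split()), len(span_sentence.split())) + 10) // 10 * 10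
--         groups.setdefault(b, []).append(idx)
--         if b > max_b:
--             max_b = b
--     return {i: groups.get(i, []) for i in range(10, max_b + 1, 10)}
-- ===== Notes on version B (the rewrite author's own statement) =====
-- stated objective: alternative
-- what changed: A rescans the whole sample list once per bucket value (nested passes via create_buckets); B makes one pass that groups indices into a dict keyed by bucket while tracking the running maximum, then emits each multiple of 10 with dict.get.
-- crash fix: On inputs where zip(eng_sentences, span_sentences) is empty (either list empty) A raises ValueError from max([]), while B returns {}. — e.g. on create_bucket_dict([], ["a"]): A raises ValueError, B returns []
import Mathlib
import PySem

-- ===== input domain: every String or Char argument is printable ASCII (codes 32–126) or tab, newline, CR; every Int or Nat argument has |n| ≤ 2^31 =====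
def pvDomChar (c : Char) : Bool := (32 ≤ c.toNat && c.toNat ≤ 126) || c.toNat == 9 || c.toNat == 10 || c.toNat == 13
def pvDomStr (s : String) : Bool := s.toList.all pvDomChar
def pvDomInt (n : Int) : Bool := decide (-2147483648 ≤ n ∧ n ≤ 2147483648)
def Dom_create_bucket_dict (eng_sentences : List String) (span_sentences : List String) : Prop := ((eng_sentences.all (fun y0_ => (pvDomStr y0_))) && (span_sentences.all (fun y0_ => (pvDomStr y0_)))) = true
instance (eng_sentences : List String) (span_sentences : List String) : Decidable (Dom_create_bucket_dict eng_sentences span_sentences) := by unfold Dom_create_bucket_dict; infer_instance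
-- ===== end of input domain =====

-- B replaces A's per-bucket rescans of the sample list with a single grouping pass
-- into a dict plus a running maximum (objective: alternative single-pass grouping).


-- ===== PORT A =====
-- roundup(x) = int(math.ceil((x+1)/10.0)) * 10, ported as integer ceiling division
-- (ceil(a/10) = -((-a)//10)); exact for the integer magnitudes involved here
def pvRoundup (x : Int) : Int :=
  (-(PySem.Int.floordiv (-(x + 1)) 10)) * 10

-- create_buckets(buckets, bucket_len): list comprehension over enumerate
def pvCreateBuckets (buckets : List Int) (bucket_len : Int) : List Int :=
  ((PySem.List.enumerate buckets 0).filter (fun p => p.2 == bucket_len)).map (·.1)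

def create_bucket_dict (eng_sentences : List String) (span_sentences : List String) : List (Int × List Int) :=
  let sample_bucket_sizes := (List.zip eng_sentences span_sentences).foldl
    (fun acc p =>
      acc ++ [pvRoundup (max ((PySem.Str.split₀ p.1).length : Int) ((PySem.Str.split₀ p.2).length : Int))]) []
  match PySem.List.max? sample_bucket_sizes (fun y => y) with
  | none => []  -- max([]) raises ValueError: these inputs are outside Pre_
  | some m =>
    ((PySem.List.pyRange 10 (m + 1) 10).foldl
      (fun d i => d.insert i (pvCreateBuckets sample_bucket_sizes i)) PySem.Dict.empty).items

-- ===== PORT B =====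
def create_bucket_dict_alt (eng_sentences : List String) (span_sentences : List String) : List (Int × List Int) :=
  let st := (PySem.List.enumerate (List.zip eng_sentences span_sentences) 0).foldl
    (fun (st : PySem.Dict Int (List Int) × Int) p =>
      let b := PySem.Int.floordiv
        (max ((PySem.Str.split₀ p.2.1).length : Int) ((PySem.Str.split₀ p.2.2).length : Int) + 10) 10 * 10
      (st.1.modify b [] (· ++ [p.1]), if b > st.2 then b else st.2))
    (PySem.Dict.empty, 0)
  ((PySem.List.pyRange 10 (st.2 + 1) 10).foldl
    (fun d i => d.insert i (st.1.getD i [])) PySem.Dict.empty).items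

-- ===== PRECONDITION & SPEC =====
-- A raises ValueError (max of an empty sequence) when zip(eng, span) is empty,
-- i.e. when either list is empty; exactly those inputs are excluded.
def Pre_create_bucket_dict (eng_sentences : List String) (span_sentences : List String) : Prop :=
  eng_sentences ≠ [] ∧ span_sentences ≠ []
instance (eng_sentences : List String) (span_sentences : List String) : Decidable (Pre_create_bucket_dict eng_sentences span_sentences) := by unfold Pre_create_bucket_dict; infer_instance
def pvWitness_create_bucket_dict : List String × List String := (["a b"], ["c"])

-- On inputs where either list is empty A raises ValueError from max([]), while B returns {}.
def Raises_create_bucket_dict (eng_sentences : List String) (span_sentences : List String) : Prop :=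
  eng_sentences = [] ∨ span_sentences = []
instance (eng_sentences : List String) (span_sentences : List String) : Decidable (Raises_create_bucket_dict eng_sentences span_sentences) := by unfold Raises_create_bucket_dict; infer_instance
def pvRaiseWitness_create_bucket_dict : List String × List String := ([], ["a"])
def pvRaiseWitnessOut_create_bucket_dict : List (Int × List Int) := []

def Spec_create_bucket_dict (eng_sentences : List String) (span_sentences : List String) (out : List (Int × List Int)) : Prop := out = create_bucket_dict_alt eng_sentences span_sentences
instance (eng_sentences : List String) (span_sentences : List String) (out : List (Int × List Int)) : Decidable (Spec_create_bucket_dict eng_sentences span_sentences out) := by unfold Spec_create_bucket_dict; infer_instance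

-- ===== CLAIM (what is proved, stated in full; the proofs are below) =====
def Claim_equal_create_bucket_dict : Prop := ∀ (eng_sentences : List String) (span_sentences : List String), Dom_create_bucket_dict eng_sentences span_sentences → Pre_create_bucket_dict eng_sentences span_sentences → Spec_create_bucket_dict eng_sentences span_sentences (create_bucket_dict eng_sentences span_sentences)
def Claim_raises_create_bucket_dict : Prop := (∀ (eng_sentences : List String) (span_sentences : List String), Dom_create_bucket_dict eng_sentences span_sentences → Raises_create_bucket_dict eng_sentences span_sentences → ¬ Pre_create_bucket_dict eng_sentences span_sentences) ∧ (Dom_create_bucket_dict (pvRaiseWitness_create_bucket_dict.1) (pvRaiseWitness_create_bucket_dict.2) ∧ Raises_create_bucket_dict (pvRaiseWitness_create_bucket_dict.1) (pvRaiseWitness_create_bucket_dict.2) ∧ create_bucket_dict_alt (pvRaiseWitness_create_bucket_dict.1) (pvRaiseWitness_create_bucket_dict.2) = pvRaiseWitnessOut_create_bucket_dict)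

-- ===== LEMMAS AND PROOFS =====

-- the per-pair bucket value both programs compute
def pvVal (p : String × String) : Int :=
  pvRoundup (max ((PySem.Str.split₀ p.1).length : Int) ((PySem.Str.split₀ p.2).length : Int))

theorem pvRoundup_eq_floor (x : Int) :
    pvRoundup x = PySem.Int.floordiv (x + 10) 10 * 10 := by
  unfold pvRoundup
  rw [PySem.Int.floordiv_eq_ediv_of_pos (by omega), PySem.Int.floordiv_eq_ediv_of_pos (by omega)]
  omega

theorem pvVal_ge_ten (p : String × String) : 10 ≤ pvVal p := by
  unfold pvVal
  rw [pvRoundup_eq_floor, PySem.Int.floordiv_eq_ediv_of_pos (by omega)]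
  have h : (0 : Int) ≤ max ((PySem.Str.split₀ p.1).length : Int) ((PySem.Str.split₀ p.2).length : Int) := by positivity
  omega

-- a fold over pairs whose components do not interact splits into two folds
theorem pvFoldl_prod {α β γ : Type} (l : List γ) (f : α → γ → α) (g : β → γ → β)
    (a : α) (b : β) :
    l.foldl (fun st x => (f st.1 x, g st.2 x)) (a, b) = (l.foldl f a, l.foldl g b) := by
  induction l generalizing a b with
  | nil => rfl
  | cons x t ih => simpa using ih (f a x) (g b x)

theorem pvEnumerate_map {α β : Type} (f : α → β) (l : List α) (s : Int) :
    PySem.List.enumerate (l.map f) s = (PySem.List.enumerate l s).map (fun p => (p.1, f p.2)) := by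
  induction l generalizing s with
  | nil => rfl
  | cons x t ih => simp [PySem.List.enumerate_cons, ih]

-- both value functions agree: indices of zs whose bucket value is i
theorem pvBuckets_eq (zs : List (String × String)) (i : Int) :
    pvCreateBuckets (zs.map pvVal) i
      = ((PySem.List.enumerate zs 0).filter (fun p => pvVal p.2 == i)).map (·.1) := by
  unfold pvCreateBuckets
  rw [pvEnumerate_map]
  rw [List.filter_map, List.map_map]
  rfl

theorem pvGroups_getD (zs : List (String × String)) (i : Int) :
    ((PySem.List.enumerate zs 0).foldl
        (fun (d : PySem.Dict Int (List Int)) p => d.modify (pvVal p.2) [] (· ++ [p.1]))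
        PySem.Dict.empty).getD i []
      = ((PySem.List.enumerate zs 0).filter (fun p => pvVal p.2 == i)).map (·.1) := by
  have h1 : ((PySem.List.enumerate zs 0).map (fun p => (pvVal p.2, p.1))).foldl
      (fun (d : PySem.Dict Int (List Int)) q => d.modify q.1 [] (· ++ [q.2])) PySem.Dict.empty
      = (PySem.List.enumerate zs 0).foldl
        (fun (d : PySem.Dict Int (List Int)) p => d.modify (pvVal p.2) [] (· ++ [p.1]))
        PySem.Dict.empty := by
    rw [List.foldl_map]
  rw [← h1, PySem.Dict.getD_foldl_modify_append]
  rw [List.filter_map, List.map_map]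
  simp [PySem.Dict.getD_empty]
  rfl

-- running max over the bucket values, started at 0, is the true maximum (values ≥ 10)
theorem pvFoldl_max_zero (v : Int) (t : List Int) (hv : 0 ≤ v) :
    (v :: t).foldl max 0 = t.foldl max v := by
  simp [List.foldl_cons, max_eq_right hv]

theorem pvFoldl_enum_snd {α β : Type} (l : List α) (s : Int) (f : β → α → β) (b : β) :
    (PySem.List.enumerate l s).foldl (fun acc p => f acc p.2) b = l.foldl f b := by
  induction l generalizing s b with
  | nil => rfl
  | cons x t ih => simp only [PySem.List.enumerate_cons, List.foldl_cons]; exact ih (s + 1) (f b x)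

theorem create_bucket_dict_spec : Claim_equal_create_bucket_dict := by
  intro eng span _ hpre
  unfold Spec_create_bucket_dict create_bucket_dict create_bucket_dict_alt
  obtain ⟨he, hs⟩ := hpre
  obtain ⟨e0, et, rfl⟩ := List.exists_cons_of_ne_nil he
  obtain ⟨s0, st, rfl⟩ := List.exists_cons_of_ne_nil hs
  set zs : List (String × String) := List.zip (e0 :: et) (s0 :: st) with hzs
  have hzcons : zs = (e0, s0) :: List.zip et st := rfl
  -- fold A's inline bucket expression into pvVal
  have hA : ∀ p : String × String,
      pvRoundup (max ((PySem.Str.split₀ p.1).length : Int) ((PySem.Str.split₀ p.2).length : Int)) = pvVal p :=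
    fun _ => rfl
  -- fold B's inline bucket expression into pvVal
  have hb : ∀ (p : Int × (String × String)),
      PySem.Int.floordiv
        (max ((PySem.Str.split₀ p.2.1).length : Int) ((PySem.Str.split₀ p.2.2).length : Int) + 10) 10 * 10
      = pvVal p.2 := by
    intro p; rw [pvVal, pvRoundup_eq_floor]
  simp only [hA, hb]
  -- A's sample list is zs.map pvVal
  have hsample : zs.foldl (fun acc p => acc ++ [pvVal p]) [] = zs.map pvVal := by
    simpa using PySem.List.foldl_append_singleton_eq_map pvVal zs []
  rw [hsample]
  -- B's fold state splits into the groups dict and the running max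
  rw [pvFoldl_prod (PySem.List.enumerate zs 0)
      (fun (d : PySem.Dict Int (List Int)) p => d.modify (pvVal p.2) [] (· ++ [p.1]))
      (fun (m : Int) p => if pvVal p.2 > m then pvVal p.2 else m)
      PySem.Dict.empty 0]
  -- the running max equals A's max
  have hmaxfold : (PySem.List.enumerate zs 0).foldl
      (fun (m : Int) p => if pvVal p.2 > m then pvVal p.2 else m) 0
      = (zs.map pvVal).foldl max 0 := by
    have h1 : (PySem.List.enumerate zs 0).foldl
        (fun (m : Int) p => if pvVal p.2 > m then pvVal p.2 else m) 0
        = zs.foldl (fun (m : Int) z => if pvVal z > m then pvVal z else m) 0 :=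
      pvFoldl_enum_snd zs 0 (fun (m : Int) z => if pvVal z > m then pvVal z else m) 0
    rw [h1, List.foldl_map]
    congr 1
    funext m z
    rw [max_def]
    split_ifs <;> omega
  rw [hmaxfold]
  have hmap : zs.map pvVal = pvVal (e0, s0) :: (List.zip et st).map pvVal := by
    rw [hzcons]; rfl
  rw [hmap, PySem.List.max?_id_cons,
      pvFoldl_max_zero _ _ (le_trans (by norm_num) (pvVal_ge_ten (e0, s0)))]
  -- same range, pointwise-equal values
  have hfun : (fun (d : PySem.Dict Int (List Int)) i => d.insert i (pvCreateBuckets (zs.map pvVal) i))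
      = (fun (d : PySem.Dict Int (List Int)) i =>
          d.insert i (((PySem.List.enumerate zs 0).foldl
            (fun (d : PySem.Dict Int (List Int)) p => d.modify (pvVal p.2) [] (· ++ [p.1]))
            PySem.Dict.empty).getD i [])) := by
    funext d i
    rw [pvBuckets_eq, pvGroups_getD]
  rw [← hmap, hfun]

theorem create_bucket_dict_raises : Claim_raises_create_bucket_dict := by
  unfold Claim_raises_create_bucket_dict
  constructor
  · intro e s _ hr hp
    unfold Pre_create_bucket_dict at hp
    rcases hr with h | h
    · exact hp.1 h
    · exact hp.2 h
  · exact ⟨by decide, by left; rfl, by decide⟩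

-- self-check: the raise witness really lies outside Pre_ (via create_bucket_dict_raises)
theorem pvRaises_witness :
    ¬ Pre_create_bucket_dict pvRaiseWitness_create_bucket_dict.1 pvRaiseWitness_create_bucket_dict.2 :=
  create_bucket_dict_raises.1 _ _ (by decide) (by left; rfl)
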